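-- pv_equiv track=rewrite | github.com/cedriclemercier/algorithms | MIDTERM/midterm.py | n2
-- ===== SOURCE A (Python) =====
-- def n2(A,B,C):
--     count =0
--     check=True
--     for i in A:
--         for j in B:
--             count += 1
--             if j == i:
--                 check = False
--                 return check, count
--
--     for i in B:
--         for j in C:
--             count += 1
--             if j == i:
--                 check = False
--                 return check, count
--
--     for i in A:
--         for j in C:
--             count += 1
--             if j == i:
--                 check = False
--                 return check, count
--
--     return check, count
-- ===== SOURCE B (Python) =====
-- def n2(A, B, C):
--     def first_index(ys):
--         d = {}
--         for k, v in enumerate(ys):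
--             if v not in d:
--                 d[v] = k
--         return d
--
--     count = 0
--     for X, Y in ((A, B), (B, C), (A, C)):
--         d = first_index(Y)
--         n = len(Y)
--         for x in X:
--             k = d.get(x)
--             if k is None:
--                 count += n
--             else:
--                 count += k + 1
--                 return False, count
--     return True, count
-- ===== Notes on version B (the rewrite author's own statement) =====
-- stated objective: alternative
-- what changed: Replaces A's nested inner scans by a dict of first-occurrence index per inner list, so each outer element costs one hash lookup (adding index+1 on a hit, len on a miss) instead of an inner scan.
import Mathlib
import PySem

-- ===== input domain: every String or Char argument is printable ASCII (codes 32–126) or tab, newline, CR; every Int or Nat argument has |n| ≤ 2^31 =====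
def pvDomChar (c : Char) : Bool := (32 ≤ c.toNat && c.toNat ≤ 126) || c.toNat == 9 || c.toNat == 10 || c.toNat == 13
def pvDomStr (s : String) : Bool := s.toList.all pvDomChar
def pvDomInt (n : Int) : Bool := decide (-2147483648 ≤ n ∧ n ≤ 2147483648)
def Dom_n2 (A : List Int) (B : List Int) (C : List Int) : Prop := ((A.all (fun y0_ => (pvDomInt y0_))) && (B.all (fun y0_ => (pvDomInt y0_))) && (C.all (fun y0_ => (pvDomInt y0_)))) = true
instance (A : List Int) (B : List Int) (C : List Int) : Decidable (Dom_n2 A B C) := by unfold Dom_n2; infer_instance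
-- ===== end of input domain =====

-- B replaces A's nested inner scans by a first-occurrence-index dict per inner list,
-- adding index+1 (hit) or len (miss) per outer element; objective: alternative algorithm.


-- ===== PORT A =====
-- inner 'for j in Y: count += 1; if j == i: return' loop: returns (count, found)
def n2InnerA (i : Int) : List Int → Int → Int × Bool
  | [], c => (c, false)
  | j :: t, c => if j == i then (c + 1, true) else n2InnerA i t (c + 1)

-- outer 'for i in X' loop over one phase, threading count
def n2OuterA (Y : List Int) : List Int → Int → Int × Bool
  | [], c => (c, false)
  | i :: t, c =>
      let r := n2InnerA i Y c
      if r.2 then r else n2OuterA Y t r.1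

def n2 (A : List Int) (B : List Int) (C : List Int) : Bool × Int :=
  let r1 := n2OuterA B A 0
  if r1.2 then (false, r1.1) else
  let r2 := n2OuterA C B r1.1
  if r2.2 then (false, r2.1) else
  let r3 := n2OuterA C A r2.1
  if r3.2 then (false, r3.1) else (true, r3.1)

-- ===== PORT B =====
-- first_index(ys): dict mapping each value to its first index (enumerate fold)
def n2FirstIdx : List Int → Int → PySem.Dict Int Int → PySem.Dict Int Int
  | [], _, d => d
  | v :: t, k, d => n2FirstIdx t (k + 1) (if d.contains v then d else d.insert v k)

-- 'for x in X' scan of one phase using the dict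
def n2ScanB (d : PySem.Dict Int Int) (n : Int) : List Int → Int → Int × Bool
  | [], c => (c, false)
  | x :: t, c =>
      match d.get? x with
      | some k => (c + (k + 1), true)
      | none => n2ScanB d n t (c + n)

-- 'for X, Y in ((A,B),(B,C),(A,C))'
def n2Phases : List (List Int × List Int) → Int → Int × Bool
  | [], c => (c, false)
  | (X, Y) :: rest, c =>
      let d := n2FirstIdx Y 0 PySem.Dict.empty
      let r := n2ScanB d (Y.length : Int) X c
      if r.2 then r else n2Phases rest r.1

def n2_alt (A : List Int) (B : List Int) (C : List Int) : Bool × Int :=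
  let r := n2Phases [(A, B), (B, C), (A, C)] 0
  if r.2 then (false, r.1) else (true, r.1)

-- ===== PRECONDITION & SPEC =====
def Spec_n2 (A : List Int) (B : List Int) (C : List Int) (out : Bool × Int) : Prop := out = n2_alt A B C
instance (A : List Int) (B : List Int) (C : List Int) (out : Bool × Int) : Decidable (Spec_n2 A B C out) := by unfold Spec_n2; infer_instance

-- ===== CLAIM (what is proved, stated in full; the proofs are below) =====
def Claim_equal_n2 : Prop := ∀ (A : List Int) (B : List Int) (C : List Int), Dom_n2 A B C → Spec_n2 A B C (n2 A B C)

-- ===== LEMMAS AND PROOFS =====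

-- first index of i in Y, as an Int offset
def n2Fidx (i : Int) : List Int → Option Int
  | [] => none
  | j :: t => if j = i then some 0 else (n2Fidx i t).map (· + 1)

theorem n2FirstIdx_get? (i : Int) (Y : List Int) (k : Int) (d : PySem.Dict Int Int) :
    (n2FirstIdx Y k d).get? i =
      ((d.get? i).orElse (fun _ => (n2Fidx i Y).map (· + k))) := by
  induction Y generalizing k d with
  | nil =>
    simp only [n2FirstIdx, n2Fidx, Option.orElse]
    rcases d.get? i with _ | w <;> simp
  | cons v t ih =>
    simp only [n2FirstIdx, n2Fidx, ih]
    by_cases hvi : v = i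
    · subst hvi
      by_cases hc : d.contains v
      · have : ∃ w, d.get? v = some w := by
          rcases h : d.get? v with _ | w
          · exfalso
            have := PySem.Dict.contains_eq_isSome_get? (d := d) (k := v)
            rw [h] at this; simp [hc] at this
          · exact ⟨w, rfl⟩
        rcases this with ⟨w, hw⟩
        simp [hc, hw, Option.orElse]
      · have hnone : d.get? v = none := by
          have := PySem.Dict.contains_eq_isSome_get? (d := d) (k := v)
          rcases h : d.get? v with _ | w
          · rfl
          · rw [h] at this; simp at this; simp [this] at hc
        simp [hc, hnone, PySem.Dict.get?_insert_self, Option.orElse]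
    · have hget : (if d.contains v then d else d.insert v k).get? i = d.get? i := by
        split
        · rfl
        · exact PySem.Dict.get?_insert_of_ne d (Ne.symm hvi) (v := k)
      rw [hget]
      rcases h : d.get? i with _ | w
      · simp [Option.orElse, hvi]
        rcases n2Fidx i t with _ | m
        · simp
        · simp [Option.map]; ring
      · simp [Option.orElse]

theorem n2Inner_eq_fidx (i : Int) (Y : List Int) (c : Int) :
    n2InnerA i Y c =
      match n2Fidx i Y with
      | some m => (c + (m + 1), true)
      | none => (c + (Y.length : Int), false) := by
  induction Y generalizing c with
  | nil => simp [n2InnerA, n2Fidx]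
  | cons j t ih =>
    simp only [n2InnerA, n2Fidx]
    by_cases hji : j = i
    · simp [hji]
    · simp only [hji, beq_iff_eq, if_false]
      rw [ih]
      rcases n2Fidx i t with _ | m
      · simp [List.length_cons]; ring_nf
      · simp [Option.map]; omega

theorem n2Outer_eq_scan (Y X : List Int) (c : Int) :
    n2OuterA Y X c = n2ScanB (n2FirstIdx Y 0 PySem.Dict.empty) (Y.length : Int) X c := by
  induction X generalizing c with
  | nil => rfl
  | cons x t ih =>
    simp only [n2OuterA, n2ScanB]
    rw [n2Inner_eq_fidx, n2FirstIdx_get?]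
    simp only [PySem.Dict.get?_empty, Option.orElse]
    rcases n2Fidx x Y with _ | m
    · simpa using ih (c + (Y.length : Int))
    · simp

-- ===== VERDICT (by name: the statement is the Claim_ definition above) =====
theorem n2_spec : Claim_equal_n2 := by
  intro A B C _
  unfold Spec_n2 n2 n2_alt
  simp only [n2Phases, n2Outer_eq_scan]
  rcases h1 : n2ScanB (n2FirstIdx B 0 PySem.Dict.empty) (B.length : Int) A 0 with ⟨c1, b1⟩
  cases b1
  · rcases h2 : n2ScanB (n2FirstIdx C 0 PySem.Dict.empty) (C.length : Int) B c1 with ⟨c2, b2⟩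
    cases b2
    · rcases h3 : n2ScanB (n2FirstIdx C 0 PySem.Dict.empty) (C.length : Int) A c2 with ⟨c3, b3⟩
      cases b3 <;> simp
    · simp
  · simp
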